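-- pv_equiv track=rewrite | github.com/Charlsz/Problems | mosaico.py | count_tile_patterns
-- ===== SOURCE A (Python) =====
-- MOD = 10**6
--
-- def count_tile_patterns(N, M):
--     dp = [[0] * (M + 1) for _ in range(N + 1)]
--
--     for i in range(N + 1):
--         dp[i][0] = 1
--     for j in range(M + 1):
--         dp[0][j] = 1
--
--     for i in range(1, N + 1):
--         for j in range(1, M + 1):
--             dp[i][j] = (dp[i - 1][j] + dp[i][j - 1]) % MOD
--
--     return dp[N][M]
-- ===== SOURCE B (Python) =====
-- MOD = 10**6
--
-- def count_tile_patterns(N, M):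
--     # single multiplicative pass: c runs through C(N+M, i) for i = 1..min(N, M)
--     c = 1
--     for i in range(1, min(N, M) + 1):
--         c = c * (N + M - i + 1) // i
--     return c % MOD
-- ===== Notes on version B (the rewrite author's own statement) =====
-- stated objective: faster
-- what changed: Replaces the (N+1)x(M+1) additive Pascal DP table with a single multiplicative loop that computes the binomial coefficient C(N+M,min(N,M)) exactly in min(N,M) steps and takes the modulus once at the end.
import Mathlib
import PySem

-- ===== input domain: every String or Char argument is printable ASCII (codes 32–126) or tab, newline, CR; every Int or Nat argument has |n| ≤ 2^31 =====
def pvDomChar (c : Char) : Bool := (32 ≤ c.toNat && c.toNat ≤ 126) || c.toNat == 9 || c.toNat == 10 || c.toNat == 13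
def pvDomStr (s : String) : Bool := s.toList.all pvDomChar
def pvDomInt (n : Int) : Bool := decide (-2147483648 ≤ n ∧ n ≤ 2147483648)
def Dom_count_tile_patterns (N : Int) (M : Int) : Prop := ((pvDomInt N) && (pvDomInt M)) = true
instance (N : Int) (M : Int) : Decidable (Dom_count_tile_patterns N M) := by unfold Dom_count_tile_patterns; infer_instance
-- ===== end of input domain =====

-- B replaces A's O(N*M) additive Pascal DP table by a single multiplicative loop of
-- min(N,M) steps computing C(N+M,min(N,M)) exactly, taking the modulus once at the end.

-- ===== PORT A =====
def pvMOD : Int := 1000000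

-- dp[i][j] read / in-place write of the list-of-lists table (Python list indexing/assignment)
def pvGet2 (dp : List (List Int)) (i j : Nat) : Int := (dp.getD i []).getD j 0
def pvSet2 (dp : List (List Int)) (i j : Nat) (v : Int) : List (List Int) :=
  dp.set i ((dp.getD i []).set j v)

def count_tile_patterns (N : Int) (M : Int) : Int :=
  -- Pre_ guarantees 0 ≤ N and 0 ≤ M, so toNat is exact and all indices are in range
  let n := N.toNat
  let m := M.toNat
  let dp0 := (List.range (n+1)).map (fun _ => List.replicate (m+1) (0 : Int))
  let dp1 := (List.range (n+1)).foldl (fun dp i => pvSet2 dp i 0 1) dp0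
  let dp2 := (List.range (m+1)).foldl (fun dp j => pvSet2 dp 0 j 1) dp1
  let dp3 := (List.range' 1 n).foldl (fun dp i =>
      (List.range' 1 m).foldl (fun dp j =>
        pvSet2 dp i j (PySem.Int.mod (pvGet2 dp (i-1) j + pvGet2 dp i (j-1)) pvMOD)) dp) dp2
  pvGet2 dp3 n m

-- ===== PORT B =====
def count_tile_patterns_alt (N : Int) (M : Int) : Int :=
  -- range(1, min(N,M)+1) has (min N M).toNat elements; the loop variable i is cast where used
  let c := (List.range' 1 (min N M).toNat).foldl
      (fun (c : Int) (i : Nat) => PySem.Int.floordiv (c * (N + M - (i : Int) + 1)) (i : Int)) 1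
  PySem.Int.mod c pvMOD

-- ===== PRECONDITION & SPEC =====
-- Pre_ excludes exactly the inputs on which A raises IndexError (negative N or M).
def Pre_count_tile_patterns (N : Int) (M : Int) : Prop := 0 ≤ N ∧ 0 ≤ M
instance (N : Int) (M : Int) : Decidable (Pre_count_tile_patterns N M) := by
  unfold Pre_count_tile_patterns; infer_instance
def pvWitness_count_tile_patterns : Int × Int := (2, 3)

def Spec_count_tile_patterns (N : Int) (M : Int) (out : Int) : Prop := out = count_tile_patterns_alt N M
instance (N : Int) (M : Int) (out : Int) : Decidable (Spec_count_tile_patterns N M out) := by unfold Spec_count_tile_patterns; infer_instance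

-- ===== CLAIM (what is proved, stated in full; the proofs are below) =====
def Claim_equal_count_tile_patterns : Prop := ∀ (N : Int) (M : Int), Dom_count_tile_patterns N M → Pre_count_tile_patterns N M → Spec_count_tile_patterns N M (count_tile_patterns N M)

-- ===== LEMMAS AND PROOFS =====

def pvF (i j : Nat) : Int := (((i + j).choose i) % 1000000 : Nat)


def pvTab (n m : Nat) (dp : List (List Int)) (g : Nat → Nat → Int) : Prop :=
  dp.length = n+1 ∧ (∀ a, a ≤ n → (dp.getD a []).length = m+1) ∧
  ∀ a b, a ≤ n → b ≤ m → pvGet2 dp a b = g a b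

theorem pv_getD_set_ne {l : List Int} {i j : Nat} (v d : Int) (h : i ≠ j) :
    (l.set i v).getD j d = l.getD j d := by
  simp [List.getD_eq_getElem?_getD, List.getElem?_set_ne h]

theorem pv_getD_set_self {l : List Int} {i : Nat} (v d : Int) (h : i < l.length) :
    (l.set i v).getD i d = v := by
  simp [List.getD_eq_getElem?_getD, h]

theorem pv_rows_set2_ne {dp : List (List Int)} {i j a : Nat} (v : Int) (h : a ≠ i) :
    (pvSet2 dp i j v).getD a [] = dp.getD a [] := by
  simp [pvSet2, List.getD_eq_getElem?_getD, List.getElem?_set_ne (Ne.symm h)]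

theorem pv_rows_set2_self {dp : List (List Int)} {i j : Nat} (v : Int) (h : i < dp.length) :
    (pvSet2 dp i j v).getD i [] = (dp.getD i []).set j v := by
  simp [pvSet2, List.getD_eq_getElem?_getD, h]

theorem pv_rowlen_set2 {dp : List (List Int)} {i j : Nat} (a : Nat) (v : Int) (h : i < dp.length) :
    ((pvSet2 dp i j v).getD a []).length = (dp.getD a []).length := by
  by_cases hai : a = i
  · subst hai; rw [pv_rows_set2_self v h]; simp
  · rw [pv_rows_set2_ne v hai]

theorem pvTab_set {n m : Nat} {dp g} (h : pvTab n m dp g) {i j : Nat}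
    (hi : i ≤ n) (hj : j ≤ m) (v : Int) :
    pvTab n m (pvSet2 dp i j v) (fun a b => if a = i ∧ b = j then v else g a b) := by
  obtain ⟨hlen, hrow, hget⟩ := h
  have hilt : i < dp.length := by omega
  refine ⟨by simp [pvSet2, hlen], ?_, ?_⟩
  · intro a ha
    rw [pv_rowlen_set2 a v hilt]; exact hrow a ha
  · intro a b ha hb
    by_cases hai : a = i
    · by_cases hbj : b = j
      · simp only [pvGet2, hai, hbj, pv_rows_set2_self v hilt]
        rw [pv_getD_set_self v 0 (by rw [hrow i hi]; omega)]
        simp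
      · simp only [pvGet2, hai, pv_rows_set2_self v hilt]
        rw [pv_getD_set_ne v 0 (fun h => hbj h.symm)]
        simpa [hbj] using hget i b hi hb
    · simp only [pvGet2, pv_rows_set2_ne v hai]
      simpa [hai] using hget a b ha hb

theorem pvTab_congr {n m : Nat} {dp g g'} (h : pvTab n m dp g)
    (hg : ∀ a b, a ≤ n → b ≤ m → g a b = g' a b) : pvTab n m dp g' :=
  ⟨h.1, h.2.1, fun a b ha hb => (h.2.2 a b ha hb).trans (hg a b ha hb)⟩

theorem pvF_pascal (i j : Nat) :
    PySem.Int.mod (pvF i (j+1) + pvF (i+1) j) pvMOD = pvF (i+1) (j+1) := by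
  rw [PySem.Int.mod_eq_emod_of_pos (by norm_num [pvMOD])]
  unfold pvF pvMOD
  have h : (i+1+(j+1)).choose (i+1) = (i+(j+1)).choose i + (i+1+j).choose (i+1) := by
    have h0 := Nat.choose_succ_succ' (i+j+1) i
    have e1 : i+1+(j+1) = i+j+1+1 := by omega
    have e2 : i+(j+1) = i+j+1 := by omega
    have e3 : i+1+j = i+j+1 := by omega
    rw [e1, e2, e3, h0]
  push_cast
  rw [h]
  push_cast
  omega

theorem pvF_zero_left (b : Nat) : pvF 0 b = 1 := by simp [pvF]
theorem pvF_zero_right (a : Nat) : pvF a 0 = 1 := by simp [pvF]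

def pvDP0 (n m : Nat) : List (List Int) :=
  (List.range (n+1)).map (fun _ => List.replicate (m+1) (0:Int))

theorem pv_tab0 (n m : Nat) : pvTab n m (pvDP0 n m) (fun _ _ => 0) := by
  unfold pvDP0 pvTab
  rw [List.map_const']
  refine ⟨by simp, ?_, ?_⟩
  · intro a ha
    rw [List.length_range, List.getD_replicate _ (by omega)]; simp
  · intro a b ha hb
    simp only [pvGet2, List.length_range]
    rw [List.getD_replicate _ (by omega), List.getD_replicate _ (by omega)]

theorem pv_init1 (n m : Nat) : ∀ k, k ≤ n+1 →
    pvTab n m ((List.range k).foldl (fun dp i => pvSet2 dp i 0 1) (pvDP0 n m))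
      (fun a b => if a < k ∧ b = 0 then 1 else 0) := by
  intro k
  induction k with
  | zero => intro _; exact pvTab_congr (pv_tab0 n m) (by intro a b _ _; simp)
  | succ k ih =>
    intro hk
    rw [List.range_succ, List.foldl_append]
    simp only [List.foldl_cons, List.foldl_nil]
    refine pvTab_congr (pvTab_set (ih (by omega)) (by omega) (by omega) 1) ?_
    intro a b _ _
    by_cases h1 : a = k ∧ b = 0 <;> by_cases h2 : a < k+1 ∧ b = 0 <;>
      simp [h1, h2] <;> omega

theorem pv_init2 (n m : Nat) (dp : List (List Int))
    (h : pvTab n m dp (fun a b => if b = 0 then 1 else 0)) : ∀ k, k ≤ m+1 →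
    pvTab n m ((List.range k).foldl (fun dp j => pvSet2 dp 0 j 1) dp)
      (fun a b => if b = 0 ∨ (a = 0 ∧ b < k) then 1 else 0) := by
  intro k
  induction k with
  | zero =>
    intro _
    refine pvTab_congr h ?_
    intro a b _ _
    by_cases hb : b = 0 <;> simp [hb]
  | succ k ih =>
    intro hk
    rw [List.range_succ, List.foldl_append]
    simp only [List.foldl_cons, List.foldl_nil]
    refine pvTab_congr (pvTab_set (ih (by omega)) (by omega) (by omega) 1) ?_
    intro a b _ _
    by_cases h1 : a = 0 ∧ b = k <;> by_cases h2 : b = 0 ∨ (a = 0 ∧ b < k) <;>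
      by_cases h3 : b = 0 ∨ (a = 0 ∧ b < k+1) <;> simp [h1, h2, h3] <;> omega

theorem pv_inner (n m i' : Nat) (hin : i'+1 ≤ n) (dp : List (List Int))
    (h : pvTab n m dp (fun a b => if a ≤ i' then pvF a b else if b = 0 then 1 else 0)) :
    ∀ t, t ≤ m → pvTab n m ((List.range' 1 t).foldl (fun dp j =>
        pvSet2 dp (i'+1) j (PySem.Int.mod (pvGet2 dp (i'+1-1) j + pvGet2 dp (i'+1) (j-1)) pvMOD)) dp)
      (fun a b => if a < i'+1 then pvF a b
        else if a = i'+1 ∧ b ≤ t then pvF a b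
        else if b = 0 then 1 else 0) := by
  intro t
  induction t with
  | zero =>
    intro _
    refine pvTab_congr h ?_
    intro a b _ _
    by_cases h1 : a ≤ i' <;> by_cases h2 : b = 0 <;>
      simp [h1, h2, pvF_zero_right] <;> omega
  | succ t ih =>
    intro ht
    rw [List.range'_1_concat, List.foldl_append]
    simp only [List.foldl_cons, List.foldl_nil]
    have htab := ih (by omega)
    have e1 : pvGet2 ((List.range' 1 t).foldl (fun dp j =>
        pvSet2 dp (i'+1) j (PySem.Int.mod (pvGet2 dp (i'+1-1) j + pvGet2 dp (i'+1) (j-1)) pvMOD)) dp)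
        (i'+1-1) (1+t) = pvF i' (t+1) := by
      rw [htab.2.2 (i'+1-1) (1+t) (by omega) (by omega)]
      simp only [Nat.add_sub_cancel]
      have : 1 + t = t + 1 := by omega
      rw [if_pos (by omega), this]
    have e2 : pvGet2 ((List.range' 1 t).foldl (fun dp j =>
        pvSet2 dp (i'+1) j (PySem.Int.mod (pvGet2 dp (i'+1-1) j + pvGet2 dp (i'+1) (j-1)) pvMOD)) dp)
        (i'+1) (1+t-1) = pvF (i'+1) t := by
      have e : 1+t-1 = t := by omega
      rw [e, htab.2.2 (i'+1) t (by omega) (by omega)]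
      beta_reduce
      rw [if_neg (by omega), if_pos (by omega)]
    rw [e1, e2, pvF_pascal, Nat.add_comm 1 t]
    refine pvTab_congr (pvTab_set htab (by omega) (by omega) _) ?_
    intro a b _ _
    by_cases h1 : a = i'+1 ∧ b = t+1 <;> by_cases h2 : a < i'+1 <;>
      by_cases h3 : a = i'+1 ∧ b ≤ t <;> by_cases h4 : a = i'+1 ∧ b ≤ t+1 <;>
      first
      | (simp only [h1, h2, h3, h4, if_pos, if_neg, and_true, and_false] <;> simp_all <;> omega)
      | (simp [h1, h2, h3, h4] <;> omega)

theorem pv_outer (n m : Nat) (dp : List (List Int))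
    (h : pvTab n m dp (fun a b => if b = 0 ∨ (a = 0 ∧ b < m+1) then 1 else 0)) :
    ∀ k, k ≤ n → pvTab n m ((List.range' 1 k).foldl (fun dp i =>
        (List.range' 1 m).foldl (fun dp j =>
          pvSet2 dp i j (PySem.Int.mod (pvGet2 dp (i-1) j + pvGet2 dp i (j-1)) pvMOD)) dp) dp)
      (fun a b => if a ≤ k then pvF a b else if b = 0 then 1 else 0) := by
  intro k
  induction k with
  | zero =>
    intro _
    refine pvTab_congr h ?_
    intro a b _ hb
    by_cases h1 : b = 0 ∨ (a = 0 ∧ b < m+1) <;> by_cases h2 : a ≤ 0 <;>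
      simp only [h1, h2, if_pos, if_neg] <;> simp_all [pvF_zero_left, pvF_zero_right] <;> omega
  | succ k ih =>
    intro hk
    rw [List.range'_1_concat, List.foldl_append]
    simp only [List.foldl_cons, List.foldl_nil]
    have e : 1 + k = k + 1 := by omega
    rw [e]
    refine pvTab_congr (pv_inner n m k (by omega) _ (ih (by omega)) m (by omega)) ?_
    intro a b _ hb
    by_cases h1 : a < k+1 <;> by_cases h2 : a = k+1 <;>
      simp [h1, h2, hb] <;> omega

theorem pvA_eq (n m : Nat) : count_tile_patterns (n : Int) (m : Int) = pvF n m := by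
  unfold count_tile_patterns
  simp only [Int.toNat_natCast]
  have e0 : (List.range (n+1)).map (fun _ => List.replicate (m+1) (0:Int)) = pvDP0 n m := rfl
  rw [e0]
  have h1 := pvTab_congr (pv_init1 n m (n+1) (by omega))
    (g' := fun a b => if b = 0 then 1 else 0)
    (by intro a b ha hb; by_cases h : b = 0 <;> simp [h] <;> omega)
  have h := pv_outer n m _ (pv_init2 n m _ h1 (m+1) (by omega)) n (by omega)
  rw [h.2.2 n m (by omega) (by omega)]
  simp

theorem pvB_loop (n m : Nat) : ∀ t, t ≤ min n m →
    (List.range' 1 t).foldl (fun (c : Int) (i : Nat) =>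
      PySem.Int.floordiv (c * ((n : Int) + (m : Int) - (i : Int) + 1)) (i : Int)) 1
      = ((n+m).choose t : Int) := by
  intro t
  induction t with
  | zero => intro _; simp
  | succ t ih =>
    intro ht
    rw [List.range'_1_concat, List.foldl_append]
    simp only [List.foldl_cons, List.foldl_nil]
    rw [ih (by omega)]
    have e : ((n : Int) + (m : Int) - ((1+t : Nat) : Int) + 1) = ((n+m-t : Nat) : Int) := by
      push_cast; omega
    rw [e, ← Nat.cast_mul, ← Nat.choose_succ_right_eq]
    have e2 : t + 1 = 1 + t := by omega
    rw [e2, PySem.Int.floordiv_natCast]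
    rw [Nat.mul_comm, Nat.mul_div_cancel_left _ (by omega)]

theorem pvB_eq (n m : Nat) : count_tile_patterns_alt (n : Int) (m : Int) = pvF n m := by
  unfold count_tile_patterns_alt
  have emin : ((min (n : Int) (m : Int)).toNat) = min n m := by omega
  simp only [emin]
  rw [pvB_loop n m (min n m) (by omega)]
  have echoose : (n+m).choose (min n m) = (n+m).choose n := by
    rcases Nat.le_total n m with h | h
    · rw [Nat.min_eq_left h]
    · rw [Nat.min_eq_right h, ← Nat.choose_symm_add]
  rw [echoose, PySem.Int.mod_eq_emod_of_pos (by norm_num [pvMOD])]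
  unfold pvF pvMOD
  omega


theorem pv_spec_core : ∀ (N M : Int), 0 ≤ N → 0 ≤ M →
    count_tile_patterns N M = count_tile_patterns_alt N M := by
  intro N M hN hM
  obtain ⟨n, rfl⟩ : ∃ n : Nat, N = (n : Int) := ⟨N.toNat, (Int.toNat_of_nonneg hN).symm⟩
  obtain ⟨m, rfl⟩ : ∃ m : Nat, M = (m : Int) := ⟨M.toNat, (Int.toNat_of_nonneg hM).symm⟩
  rw [pvA_eq, pvB_eq]

-- ===== VERDICT (by name: the statement is the Claim_ definition above) =====
theorem count_tile_patterns_spec : Claim_equal_count_tile_patterns := by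
  intro N M _ hpre
  exact pv_spec_core N M hpre.1 hpre.2
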